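-- pv_equiv track=rewrite | github.com/oleggr/another_one_resolver | dns_searcher.py | _symbol_remover
-- ===== SOURCE A (Python) =====
-- def _symbol_remover(word):
--     """
--     Стратегия изменения слова, удалением одной буквы
--     :param word: str - Немодифицированное слово
--     :return: Список модифицированных слов,
--     полученных из исходного
--     """
--
--     modified_word = []
--     tmp = word
--
--     # Проходя по слову, удаляем одну букву и заносим
--     # модифицированное слово в список
--
--     for i in range(0, len(word)):
--         tmp = word[0:i] + word[i+1:len(word)]
--
--         # TODO конструкция not in предпочтительнее (ИСПРАВЛЕНО)
--         # if not tmp in modified_word: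
--         if tmp not in modified_word:
--             modified_word.append(tmp)
--
--     return modified_word
-- ===== SOURCE B (Python) =====
-- def _symbol_remover(word):
--     """Distinct one-char-removed words, first-occurrence order.
--
--     Duplicates arise exactly from runs of equal adjacent characters, so
--     keep the removal at index i only when i is the start of such a run.
--     """
--     modified_word = []
--     for i in range(len(word)):
--         if i == 0 or word[i] != word[i - 1]:
--             modified_word.append(word[:i] + word[i + 1:])
--     return modified_word
-- ===== Notes on version B (the rewrite author's own statement) =====
-- stated objective: faster
-- what changed: The seen-list and its linear membership scan are removed entirely; distinctness is decided locally by comparing word[i] with word[i-1] (duplicate removals arise exactly from runs of equal adjacent characters), so B appends only at run starts.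
import Mathlib
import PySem

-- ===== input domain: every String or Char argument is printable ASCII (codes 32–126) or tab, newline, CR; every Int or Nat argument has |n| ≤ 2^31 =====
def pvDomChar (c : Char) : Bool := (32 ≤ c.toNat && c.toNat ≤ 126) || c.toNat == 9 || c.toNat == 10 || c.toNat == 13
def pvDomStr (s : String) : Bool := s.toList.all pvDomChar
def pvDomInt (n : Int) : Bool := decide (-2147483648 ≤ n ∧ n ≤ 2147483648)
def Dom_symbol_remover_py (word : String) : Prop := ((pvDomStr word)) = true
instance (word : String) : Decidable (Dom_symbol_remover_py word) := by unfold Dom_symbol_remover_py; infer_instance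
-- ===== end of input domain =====

-- B removes A's seen-list and its linear membership scan: duplicates arise exactly from runs of
-- equal adjacent characters, so B appends word[:i]+word[i+1:] only when i == 0 or word[i] != word[i-1]
-- (objective: faster — O(n^2) instead of A's O(n^3) membership scanning).


-- ===== PORT A =====
-- for i in range(0, len(word)): tmp = word[0:i] + word[i+1:len(word)]; if tmp not in acc: acc.append(tmp)
def symbol_remover_py (word : String) : List String :=
  (PySem.List.pyRange 0 (PySem.Str.len word) 1).foldl
    (fun acc i =>
      let tmp := String.ofList
        (PySem.List.slice word.toList (some 0) (some i) ++
         PySem.List.slice word.toList (some (i + 1)) (some (PySem.Str.len word)))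
      if tmp ∈ acc then acc else acc ++ [tmp]) []

-- ===== PORT B =====
-- for i in range(len(word)): if i == 0 or word[i] != word[i-1]: acc.append(word[:i] + word[i+1:])
def symbol_remover_py_alt (word : String) : List String :=
  (PySem.List.pyRange 0 (PySem.Str.len word) 1).foldl
    (fun acc i =>
      if i == 0 || PySem.List.pyGet? word.toList i != PySem.List.pyGet? word.toList (i - 1) then
        acc ++ [String.ofList
          (PySem.List.slice word.toList none (some i) ++
           PySem.List.slice word.toList (some (i + 1)) none)]
      else acc) []

-- ===== PRECONDITION & SPEC =====
def Spec_symbol_remover_py (word : String) (out : List String) : Prop := out = symbol_remover_py_alt word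
instance (word : String) (out : List String) : Decidable (Spec_symbol_remover_py word out) := by unfold Spec_symbol_remover_py; infer_instance

-- ===== CLAIM (what is proved, stated in full; the proofs are below) =====
def Claim_equal_symbol_remover_py : Prop := ∀ (word : String), Dom_symbol_remover_py word → Spec_symbol_remover_py word (symbol_remover_py word)

-- ===== LEMMAS AND PROOFS =====

-- the word with the character at index k removed
def pvDelAt (cs : List Char) (k : Nat) : List Char := cs.take k ++ cs.drop (k + 1)

-- A's loop body over Nat indices
def pvStepA (cs : List Char) (acc : List String) (k : Nat) : List String :=
  let t := String.ofList (pvDelAt cs k)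
  if t ∈ acc then acc else acc ++ [t]

-- B's run-start condition over Nat indices (k - 1 is Nat subtraction; at k = 0 the first disjunct fires)
def pvCondB (cs : List Char) (k : Nat) : Bool := k == 0 || cs[k]? != cs[k - 1]?

-- B's output on the first m indices
def pvOutB (cs : List Char) (m : Nat) : List String :=
  (List.range m).foldl
    (fun acc k => if pvCondB cs k then acc ++ [String.ofList (pvDelAt cs k)] else acc) []

theorem pvDelAt_of_eq_prev (cs : List Char) (m : Nat) (hm : m < cs.length) (h1 : 1 ≤ m)
    (heq : cs[m]? = cs[m - 1]?) : pvDelAt cs m = pvDelAt cs (m - 1) := by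
  obtain ⟨m, rfl⟩ : ∃ p, m = p + 1 := ⟨m - 1, by omega⟩
  simp only [Nat.add_sub_cancel] at heq ⊢
  have hm' : m < cs.length := by omega
  have hget : cs[m + 1]'hm = cs[m]'hm' := by
    have := heq
    rw [List.getElem?_eq_getElem hm, List.getElem?_eq_getElem hm'] at this
    exact Option.some_injective _ this
  have ht : cs.take (m + 1) = cs.take m ++ [cs[m]'hm'] := by
    rw [List.take_add_one]
    simp [List.getElem?_eq_getElem hm']
  unfold pvDelAt
  rw [ht, List.drop_eq_getElem_cons hm, hget, List.append_assoc]
  rfl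

theorem pvDelAt_ne_of_ne_prev (cs : List Char) (m j : Nat) (hm : m < cs.length) (h1 : 1 ≤ m)
    (hj : j < m) (hne : cs[m]? ≠ cs[m - 1]?) : pvDelAt cs j ≠ pvDelAt cs m := by
  intro h
  apply hne
  have hjlen : (cs.take j).length = j := by rw [List.length_take]; omega
  have hgm : (pvDelAt cs m)[m - 1]? = cs[m - 1]? := by
    unfold pvDelAt
    rw [List.getElem?_append_left (by rw [List.length_take]; omega)]
    exact List.getElem?_take_of_lt (by omega)
  have hgj : (pvDelAt cs j)[m - 1]? = cs[m]? := by
    unfold pvDelAt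
    rw [List.getElem?_append_right (by rw [hjlen]; omega), hjlen, List.getElem?_drop]
    congr 1
    omega
  calc cs[m]? = (pvDelAt cs j)[m - 1]? := hgj.symm
    _ = (pvDelAt cs m)[m - 1]? := by rw [h]
    _ = cs[m - 1]? := hgm

theorem pvOfList_inj (l l' : List Char) (h : String.ofList l = String.ofList l') : l = l' := by
  simpa using congrArg String.toList h

-- membership in B's partial output = being some earlier removal
theorem pvMemOutB (cs : List Char) : ∀ m, m ≤ cs.length →
    ((List.range m).foldl (pvStepA cs) [] = pvOutB cs m ∧
      ∀ t, t ∈ pvOutB cs m ↔ ∃ j, j < m ∧ t = String.ofList (pvDelAt cs j)) := by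
  intro m
  induction m with
  | zero => intro _; simp [pvOutB]
  | succ m ih =>
    intro hm
    obtain ⟨hA, hMem⟩ := ih (by omega)
    have hrange : List.range (m + 1) = List.range m ++ [m] := List.range_succ
    have hOutB : pvOutB cs (m + 1) =
        (if pvCondB cs m then pvOutB cs m ++ [String.ofList (pvDelAt cs m)] else pvOutB cs m) := by
      unfold pvOutB
      rw [hrange, List.foldl_append]
      rfl
    have hAfold : (List.range (m + 1)).foldl (pvStepA cs) [] = pvStepA cs (pvOutB cs m) m := by
      rw [hrange, List.foldl_append, hA]; rfl
    by_cases h0 : m = 0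
    · subst h0
      have hc : pvCondB cs 0 = true := by simp [pvCondB]
      have h00 : pvOutB cs 0 = ([] : List String) := by simp [pvOutB]
      have hOutB' : pvOutB cs 1 = [String.ofList (pvDelAt cs 0)] := by
        rw [hOutB, hc, h00]; simp
      constructor
      · rw [hAfold, hOutB', h00, pvStepA]
        simp
      · intro t
        rw [hOutB']
        simp only [List.mem_singleton]
        constructor
        · rintro rfl; exact ⟨0, Nat.one_pos, rfl⟩
        · rintro ⟨j, hj, rfl⟩
          have : j = 0 := by omega
          rw [this]
    · have h1 : 1 ≤ m := by omega
      have hmlen : m < cs.length := by omega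
      by_cases heq : cs[m]? = cs[m - 1]?
      · -- same as previous char: B skips; A finds the duplicate in its list
        have hc : pvCondB cs m = false := by
          simp [pvCondB, heq, h0]
        have hdel : pvDelAt cs m = pvDelAt cs (m - 1) :=
          pvDelAt_of_eq_prev cs m hmlen h1 heq
        have hin : String.ofList (pvDelAt cs m) ∈ pvOutB cs m := by
          rw [hMem]
          exact ⟨m - 1, by omega, by rw [hdel]⟩
        have hOutB' : pvOutB cs (m + 1) = pvOutB cs m := by rw [hOutB, hc]; simp
        constructor
        · rw [hAfold, hOutB', pvStepA]
          simp only [if_pos hin]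
        · intro t
          rw [hOutB', hMem]
          constructor
          · rintro ⟨j, hj, rfl⟩; exact ⟨j, by omega, rfl⟩
          · rintro ⟨j, hj, rfl⟩
            by_cases hjm : j = m
            · refine ⟨m - 1, by omega, ?_⟩
              rw [hjm, hdel]
            · exact ⟨j, by omega, rfl⟩
      · -- run start: B appends; A's membership test fails
        have hc : pvCondB cs m = true := by simp [pvCondB, heq]
        have hnin : String.ofList (pvDelAt cs m) ∉ pvOutB cs m := by
          rw [hMem]
          rintro ⟨j, hj, hjeq⟩
          exact pvDelAt_ne_of_ne_prev cs m j hmlen h1 hj heq (pvOfList_inj _ _ hjeq.symm)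
        have hOutB' : pvOutB cs (m + 1) = pvOutB cs m ++ [String.ofList (pvDelAt cs m)] := by
          rw [hOutB, hc]; simp
        constructor
        · rw [hAfold, hOutB', pvStepA]
          simp only [if_neg hnin]
        · intro t
          rw [hOutB']
          constructor
          · intro ht
            rcases List.mem_append.mp ht with h | h
            · obtain ⟨j, hj, hje⟩ := (hMem t).mp h
              exact ⟨j, by omega, hje⟩
            · exact ⟨m, by omega, by simpa using h⟩
          · rintro ⟨j, hj, rfl⟩
            by_cases hjm : j = m
            · rw [hjm]; simp
            · exact List.mem_append_left _ ((hMem _).mpr ⟨j, by omega, rfl⟩)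

-- Port A over Nat indices
theorem pvPortA (word : String) :
    symbol_remover_py word = (List.range word.toList.length).foldl (pvStepA word.toList) [] := by
  unfold symbol_remover_py
  rw [show PySem.Str.len word = (word.toList.length : Int) from PySem.Str.len_eq word,
    PySem.List.pyRange_one, List.foldl_map]
  apply congrFun (congrFun (congrArg List.foldl ?_) []) _
  funext acc k
  simp only [zero_add]
  have h1 : PySem.List.slice word.toList (some 0) (some ((k : Nat) : Int)) = word.toList.take k := by
    rw [PySem.List.slice_toNat word.toList (by omega) (by positivity)]
    simp
  have h2 : PySem.List.slice word.toList (some (((k : Nat) : Int) + 1)) (some (word.toList.length : Int)) =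
      word.toList.drop (k + 1) := by
    rw [PySem.List.slice_toNat word.toList (by positivity) (by positivity)]
    rw [show (((k : Nat) : Int) + 1).toNat = k + 1 by omega,
      show ((word.toList.length : Int)).toNat = word.toList.length by omega]
    exact List.take_of_length_le (by simp)
  simp only [h1, h2, pvStepA, pvDelAt]

-- Port B over Nat indices
theorem pvPortB (word : String) :
    symbol_remover_py_alt word = pvOutB word.toList word.toList.length := by
  unfold symbol_remover_py_alt pvOutB
  rw [show PySem.Str.len word = (word.toList.length : Int) from PySem.Str.len_eq word,
    PySem.List.pyRange_one, List.foldl_map]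
  apply congrFun (congrFun (congrArg List.foldl ?_) []) _
  funext acc k
  simp only [zero_add]
  have hcond : (((k : Nat) : Int) == 0 ||
      PySem.List.pyGet? word.toList ((k : Nat) : Int) != PySem.List.pyGet? word.toList (((k : Nat) : Int) - 1)) =
      pvCondB word.toList k := by
    by_cases h0 : k = 0
    · subst h0; simp [pvCondB]
    · have hk1 : (((k : Nat) : Int) - 1) = (((k - 1 : Nat)) : Int) := by omega
      rw [hk1, PySem.List.pyGet?_natCast, PySem.List.pyGet?_natCast]
      simp [pvCondB, beq_eq_decide]
  rw [hcond]
  have h1 : PySem.List.slice word.toList none (some ((k : Nat) : Int)) = word.toList.take k := by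
    rw [PySem.List.slice_to word.toList (by positivity)]
    simp
  have h2 : PySem.List.slice word.toList (some (((k : Nat) : Int) + 1)) none = word.toList.drop (k + 1) := by
    rw [PySem.List.slice_from word.toList (by positivity)]
    norm_num
  simp only [h1, h2, pvDelAt]

-- ===== VERDICT (by name: the statement is the Claim_ definition above) =====
theorem symbol_remover_py_spec : Claim_equal_symbol_remover_py := by
  intro word _
  unfold Spec_symbol_remover_py
  rw [pvPortA, pvPortB]
  exact (pvMemOutB word.toList word.toList.length (Nat.le_refl _)).1
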